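-- pv_equiv track=rewrite | github.com/IwannabeDirector/5_1_NSU_for_Mitya | pie_plot.py | consensus_with_degenerate_alphabet
-- ===== SOURCE A (Python) =====
-- degenerate_dict = {
-- 		('C', 'T'): 'Y',
-- 		('A', 'G'): 'R',
-- 		('A', 'T'): 'W',
-- 		('G', 'C'): 'S',
-- 		('G', 'T'): 'K',
-- 		('C', 'A'): 'M',
-- 		('A', 'G', 'T'): 'D',
-- 		('A', 'C', 'G'): 'V',
-- 		('A', 'C', 'T'): 'H',
-- 		('C', 'T', 'G'): 'B',
-- 		('A', 'C', 'T', 'G'): 'X'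
-- 	}
--
-- def consensus_with_degenerate_alphabet(seq_list: list) -> list:
-- 	seq_length = len(seq_list[0])
-- 	nucl_freq = [{nucl: 0 for nucl in 'ATGC'} for _ in range(seq_length)]
--
-- 	for seq in seq_list:
-- 		for pos, base in enumerate(seq):
-- 			nucl_freq[pos][base] += 1
--
-- 	cons = []
-- 	for pos in nucl_freq:
-- 		max_base = [key for key, value in pos.items() if value == max(pos.values())]
-- 		for key_tuple, degenerate_symbol in degenerate_dict.items():
-- 			if set(max_base) == set(key_tuple):
-- 				cons.append(degenerate_symbol)
-- 				break
-- 		else: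
-- 			cons.append(max_base[0])
-- 	return cons
-- ===== SOURCE B (Python) =====
-- degenerate_dict = {
-- 		('C', 'T'): 'Y',
-- 		('A', 'G'): 'R',
-- 		('A', 'T'): 'W',
-- 		('G', 'C'): 'S',
-- 		('G', 'T'): 'K',
-- 		('C', 'A'): 'M',
-- 		('A', 'G', 'T'): 'D',
-- 		('A', 'C', 'G'): 'V',
-- 		('A', 'C', 'T'): 'H',
-- 		('C', 'T', 'G'): 'B',
-- 		('A', 'C', 'T', 'G'): 'X'
-- 	}
--
-- # Reverse lookup: sorted winner string -> consensus symbol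
-- # (degenerate symbols for multi-base ties, the base itself for a sole winner).
-- _SYMBOL = {''.join(sorted(k)): v for k, v in degenerate_dict.items()}
-- for _b in 'ACGT':
-- 	_SYMBOL[_b] = _b
--
-- def _runs(col):
-- 	# run-length encode an already-sorted list
-- 	if not col:
-- 		return []
-- 	n = 1
-- 	while n < len(col) and col[n] == col[0]:
-- 		n += 1
-- 	return [(col[0], n)] + _runs(col[n:])
--
-- def consensus_with_degenerate_alphabet(seq_list: list) -> list:
-- 	cons = []
-- 	for i in range(len(seq_list[0])):
-- 		col = sorted(seq[i] for seq in seq_list if i < len(seq))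
-- 		counts = [0, 0, 0, 0]
-- 		for ch, cnt in _runs(col):
-- 			counts['ACGT'.index(ch)] = cnt
-- 		best = max(counts)
-- 		winners = ''.join(b for b, cnt in zip('ACGT', counts) if cnt == best)
-- 		cons.append(_SYMBOL[winners])
-- 	return cons
-- ===== Notes on version B (the rewrite author's own statement) =====
-- stated objective: alternative
-- what changed: B sorts each position's column and run-length encodes it (sort-then-scan) instead of A's per-position frequency dict + max + linear scan of degenerate_dict with set-equality tests; the max-count runs form a sorted winner string looked up in one precomputed table.
import Mathlib
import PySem

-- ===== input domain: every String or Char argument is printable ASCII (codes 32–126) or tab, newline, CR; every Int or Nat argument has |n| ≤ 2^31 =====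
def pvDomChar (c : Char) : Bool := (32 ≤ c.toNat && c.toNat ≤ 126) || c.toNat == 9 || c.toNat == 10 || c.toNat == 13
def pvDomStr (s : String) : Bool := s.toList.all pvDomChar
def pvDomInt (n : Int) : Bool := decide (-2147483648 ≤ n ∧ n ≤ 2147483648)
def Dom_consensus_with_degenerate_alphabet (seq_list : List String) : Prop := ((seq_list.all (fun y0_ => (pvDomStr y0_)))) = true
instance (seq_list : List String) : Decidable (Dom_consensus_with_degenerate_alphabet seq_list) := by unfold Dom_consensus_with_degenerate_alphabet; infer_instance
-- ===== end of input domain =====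

-- B replaces A's per-position frequency dict + max + linear scan of degenerate_dict (set-equality
-- tests with a for/else fallback) by sort-then-scan: each column is sorted, run-length encoded,
-- the max-count runs give the winner string, looked up in one precomputed table.

-- the module constant degenerate_dict (tuple keys as char lists, in source order)
def pvDegenItems : List (List Char × String) :=
  [(['C','T'], "Y"), (['A','G'], "R"), (['A','T'], "W"), (['G','C'], "S"), (['G','T'], "K"),
   (['C','A'], "M"), (['A','G','T'], "D"), (['A','C','G'], "V"), (['A','C','T'], "H"),
   (['C','T','G'], "B"), (['A','C','T','G'], "X")]

-- ===== PORT A =====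
-- Python set equality set(xs) == set(ys) is mutual inclusion (exact)
def pvSetEq (xs ys : List Char) : Bool := xs.all (fun x => ys.contains x) && ys.all (fun y => xs.contains y)

-- the body of A's final loop: max_base, then the for/else scan over degenerate_dict
def pvChoose (pos : PySem.Dict Char Int) : String :=
  let max_base := (pos.items.filter (fun kv => kv.2 == (PySem.List.max? pos.values (fun v => v)).getD 0)).map (fun kv => kv.1)
  match pvDegenItems.find? (fun kv => pvSetEq max_base kv.1) with
  | some kv => kv.2
  | none => String.ofList [max_base.headD 'A']   -- max_base[0]: max_base is nonempty whenever the dict is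

def consensus_with_degenerate_alphabet (seq_list : List String) : List String :=
  -- len(seq_list[0]): IndexError on [] is excluded by Pre_
  let seq_length := (seq_list.headD "").toList.length
  let nucl_freq : List (PySem.Dict Char Int) :=
    (List.range seq_length).map (fun _ => PySem.Dict.ofList [('A', (0 : Int)), ('T', 0), ('G', 0), ('C', 0)])
  -- nucl_freq[pos][base] += 1: List.modify is a no-op where Python raises IndexError (pos ≥ seq_length)
  -- and Dict.modify appends a key where Python raises KeyError (base ∉ 'ATGC'); both are excluded by Pre_
  let nucl_freq := seq_list.foldl (fun nf seq =>
      (PySem.List.enumerate seq.toList 0).foldl (fun nf pb =>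
        nf.modify pb.1.toNat (fun d => d.modify pb.2 0 (· + 1))) nf) nucl_freq
  nucl_freq.foldl (fun cons pos => cons ++ [pvChoose pos]) []

-- ===== PORT B =====
-- _SYMBOL: reverse lookup table, sorted winner string -> consensus symbol
def pvSymbolTable : PySem.Dict String String :=
  let d := PySem.Dict.ofList (pvDegenItems.map (fun kv => (String.ofList (PySem.List.sorted kv.1 (fun c => c) false), kv.2)))
  ("ACGT".toList).foldl (fun d b => d.insert (String.ofList [b]) (String.ofList [b])) d

-- _runs(col): run-length encode an already-sorted list (the inner while loop counting the
-- leading run is the takeWhile length; col[n:] is the matching drop); the fuel argument only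
-- makes the recursion structural (one unit per run, started at the list length, so it never
-- runs out) and changes no value
def pvRunsAux : Nat → List Char → List (Char × Int)
  | _, [] => []
  | 0, _ :: _ => []
  | fuel+1, x :: xs =>
      let n := (xs.takeWhile (fun y => y == x)).length + 1
      (x, (n : Int)) :: pvRunsAux fuel (xs.drop (n - 1))

def pvRuns (col : List Char) : List (Char × Int) := pvRunsAux col.length col

-- the body of B's loop over positions i
def pvAltVal (seq_list : List String) (i : Int) : String :=
  -- the generator (seq[i] for seq in seq_list if i < len(seq)); the pyGetD default is
  -- unreachable under the i < len(seq) guard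
  let col := PySem.List.sorted
    ((seq_list.filter (fun s => i < PySem.List.len s.toList)).map (fun s => PySem.List.pyGetD s.toList i 'A'))
    (fun c => c) false
  -- counts['ACGT'.index(ch)] = cnt: .toNat is exact here because a character outside 'ACGT'
  -- (find = -1, Python ValueError) is excluded by Pre_
  let counts := (pvRuns col).foldl (fun counts r =>
      counts.set (PySem.Chars.find "ACGT".toList [r.1]).toNat r.2) [(0 : Int), 0, 0, 0]
  let best := (PySem.List.max? counts (fun v => v)).getD 0   -- max(counts): counts never empty
  let winners := String.ofList (((("ACGT".toList).zip counts).filter (fun p => p.2 == best)).map (fun p => p.1))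
  pvSymbolTable.getD winners ""   -- _SYMBOL[winners]: always present for nonempty winners ⊆ ACGT

def consensus_with_degenerate_alphabet_alt (seq_list : List String) : List String :=
  (PySem.List.pyRange 0 (PySem.List.len (seq_list.headD "").toList) 1).foldl
    (fun cons i => cons ++ [pvAltVal seq_list i]) []

-- ===== PRECONDITION & SPEC =====
-- Pre_ excludes exactly the inputs where A raises: the empty list (IndexError on seq_list[0]),
-- a sequence longer than the first (IndexError on nucl_freq[pos]), and characters outside
-- 'ATGC' (KeyError on the counting dict).
def Pre_consensus_with_degenerate_alphabet (seq_list : List String) : Prop :=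
  seq_list ≠ [] ∧
  (seq_list.all (fun s => decide (s.toList.length ≤ (seq_list.headD "").toList.length) &&
     s.toList.all (fun c => ['A', 'T', 'G', 'C'].contains c))) = true
instance (seq_list : List String) : Decidable (Pre_consensus_with_degenerate_alphabet seq_list) := by
  unfold Pre_consensus_with_degenerate_alphabet; infer_instance

def pvWitness_consensus_with_degenerate_alphabet : List String := ["ATGC", "ATGA", "TTG"]

def Spec_consensus_with_degenerate_alphabet (seq_list : List String) (out : List String) : Prop :=
  out = consensus_with_degenerate_alphabet_alt seq_list
instance (seq_list : List String) (out : List String) : Decidable (Spec_consensus_with_degenerate_alphabet seq_list out) := by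
  unfold Spec_consensus_with_degenerate_alphabet; infer_instance

-- ===== CLAIM (what is proved, stated in full; the proofs are below) =====
def Claim_equal_consensus_with_degenerate_alphabet : Prop :=
  ∀ (seq_list : List String), Dom_consensus_with_degenerate_alphabet seq_list →
    Pre_consensus_with_degenerate_alphabet seq_list →
    Spec_consensus_with_degenerate_alphabet seq_list (consensus_with_degenerate_alphabet seq_list)

-- ===== LEMMAS AND PROOFS =====

-- the fresh per-position counting dict and the column of characters at k
def pvBase : PySem.Dict Char Int := PySem.Dict.ofList [('A', (0 : Int)), ('T', 0), ('G', 0), ('C', 0)]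
def pvCol (seq_list : List String) (k : Nat) : List Char :=
  seq_list.filterMap (fun s => s.toList[k]?)

-- A's inner loop (over enumerate(seq)) seen at one index k
theorem pv_inner_getElem? (cs : List Char) : ∀ (st k : Nat) (nf : List (PySem.Dict Char Int)),
    ((PySem.List.enumerate cs (st:Int)).foldl
      (fun nf pb => nf.modify pb.1.toNat (fun d => d.modify pb.2 0 (· + 1))) nf)[k]? =
    (match (if st ≤ k then cs[k - st]? else none) with
     | some x => (nf[k]?).map (fun d => d.modify x 0 (· + 1))
     | none => nf[k]?) := by
  induction cs with
  | nil => intro st k nf; simp [PySem.List.enumerate_nil, ite_self]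
  | cons x cs ih =>
    intro st k nf
    rw [PySem.List.enumerate_cons]
    simp only [List.foldl_cons]
    have h1 : ((st:Int)+1) = (((st+1:Nat)):Int) := by push_cast; ring
    rw [h1, ih (st+1) k]
    have h2 : ((st:Int)).toNat = st := Int.toNat_natCast st
    rw [h2]
    rcases Nat.lt_trichotomy k st with h | h | h
    · have hik : ¬ st ≤ k := by omega
      have hik1 : ¬ st + 1 ≤ k := by omega
      simp [hik, hik1, List.getElem?_modify_ne _ _ (by omega : st ≠ k)]
    · subst h
      have h3 : k - k = 0 := by omega
      simp [List.getElem?_modify_eq, Option.map_eq_map]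
    · have hik : st ≤ k := by omega
      have hik1 : st + 1 ≤ k := by omega
      have h3 : k - st = (k - (st+1)) + 1 := by omega
      rw [h3]
      simp only [hik, hik1, if_true, List.getElem?_cons_succ]
      cases cs[k - (st+1)]? <;>
        simp [List.getElem?_modify_ne _ _ (by omega : st ≠ k)]

-- A's whole counting loop at one index k is the per-column counting fold
theorem pv_outer_getElem? (l : List String) : ∀ (nf : List (PySem.Dict Char Int)) (k : Nat),
    (l.foldl (fun nf seq => (PySem.List.enumerate seq.toList 0).foldl
       (fun nf pb => nf.modify pb.1.toNat (fun d => d.modify pb.2 0 (· + 1))) nf) nf)[k]? =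
    (nf[k]?).map (fun d => (pvCol l k).foldl (fun d x => d.modify x 0 (· + 1)) d) := by
  induction l with
  | nil => intro nf k; cases h : nf[k]? <;> simp [pvCol, h]
  | cons s l ih =>
    intro nf k
    simp only [List.foldl_cons]
    rw [ih]
    have hz := pv_inner_getElem? s.toList 0 k nf
    simp only [Nat.cast_zero] at hz
    rw [hz]
    simp only [pvCol, List.filterMap_cons, Nat.zero_le, if_true, Nat.sub_zero]
    cases h : s.toList[k]? with
    | none => simp
    | some x =>
      cases h2 : nf[k]? <;> simp [List.foldl_cons]

-- updating a set with elements it already has changes nothing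
theorem pv_set_update_of_mem : ∀ (col : List Char) (s : PySem.Set Char),
    (∀ x ∈ col, x ∈ s) → PySem.Set.update s col = s := by
  intro col
  induction col with
  | nil => intro s _; rfl
  | cons x t ih =>
    intro s h
    have hx : PySem.Set.add s x = s := by
      simp [PySem.Set.add, List.contains_eq_mem, h x (by simp)]
    show PySem.Set.update (PySem.Set.add s x) t = s
    rw [hx]
    exact ih s (fun y hy => h y (by simp [hy]))

-- the per-column counting fold, as a literal four-entry dict of counts
theorem pv_colCnt_eq (col : List Char) (h : ∀ x ∈ col, x ∈ ['A','T','G','C']) :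
    col.foldl (fun d x => d.modify x 0 (· + 1)) pvBase =
    PySem.Dict.mk [('A', (col.count 'A' : Int)), ('T', (col.count 'T' : Int)),
                   ('G', (col.count 'G' : Int)), ('C', (col.count 'C' : Int))] := by
  have hkeys : (col.foldl (fun d x => d.modify x 0 (· + 1)) pvBase).keys = ['A','T','G','C'] := by
    rw [PySem.Dict.keys_foldl_modify]
    rw [show pvBase.keys = ['A','T','G','C'] from rfl]
    exact pv_set_update_of_mem col _ h
  have hnd : (col.foldl (fun d x => d.modify x 0 (· + 1)) pvBase).keys.Nodup := by
    rw [hkeys]; decide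
  apply PySem.Dict.ext
  rw [PySem.Dict.items_eq_map_keys _ hnd 0, hkeys]
  simp only [List.map_cons, List.map_nil, PySem.Dict.getD_foldl_modify_add_one]
  norm_num [show pvBase.getD 'A' 0 = 0 from rfl, show pvBase.getD 'T' 0 = 0 from rfl,
    show pvBase.getD 'G' 0 = 0 from rfl, show pvBase.getD 'C' 0 = 0 from rfl,
    PySem.List.count_eq]

-- the winner string both sides produce: bases (in ACGT order) whose count equals m
def pvKey (a c g t m : Int) : List Char :=
  (([('A',a),('C',c),('G',g),('T',t)] : List (Char × Int)).filter (fun p => p.2 == m)).map (fun p => p.1)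

set_option maxRecDepth 4000 in
theorem pvChoose_eq (a t g c : Int) :
    pvChoose (PySem.Dict.mk [('A',a),('T',t),('G',g),('C',c)]) =
    pvSymbolTable.getD (String.ofList (pvKey a c g t ([t,g,c].foldl max a))) "" := by
  have hv : (PySem.Dict.mk [('A',a),('T',t),('G',g),('C',c)]).values = [a,t,g,c] := by simp
  rw [pvChoose]
  simp only [hv, PySem.List.max?_id_cons, Option.getD_some]
  set m := [t,g,c].foldl max a with hmdef
  have hm : m = a ∨ m ∈ [t,g,c] := PySem.List.foldl_max_mem [t,g,c] a
  by_cases ha : a = m <;> by_cases ht : t = m <;> by_cases hg : g = m <;> by_cases hc : c = m <;>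
    first
      | (simp only [List.mem_cons, List.not_mem_nil, or_false] at hm
         rcases hm with h | h | h | h
         exacts [absurd h.symm ha, absurd h.symm ht, absurd h.symm hg, absurd h.symm hc])
      | (simp only [pvKey, List.filter_cons, List.filter_nil]
         simp [ha, ht, hg, hc]
         try decide)


-- the column B gathers (before sorting) is pvCol
theorem pv_col_eq (sl : List String) (k : Nat) :
    (sl.filter (fun s => decide ((k:Int) < PySem.List.len s.toList))).map
      (fun s => PySem.List.pyGetD s.toList (k:Int) 'A') = pvCol sl k := by
  induction sl with
  | nil => rfl
  | cons s l ih =>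
    simp only [pvCol, List.filterMap_cons, List.filter_cons]
    by_cases hk : k < s.toList.length
    · have hlt : ((k:Int) < PySem.List.len s.toList) := by
        simp only [PySem.List.len_eq]; exact_mod_cast hk
      have hget : PySem.List.pyGetD s.toList (k:Int) 'A' = s.toList[k] := by
        rw [PySem.List.pyGetD_natCast]
        exact List.getD_eq_getElem _ _ hk
      simp only [hlt, decide_true, if_true, List.map_cons, hget,
        List.getElem?_eq_getElem hk]
      rw [ih]; rfl
    · have hge : ¬ ((k:Int) < PySem.List.len s.toList) := by
        simp only [PySem.List.len_eq]; omega
      have hnone : s.toList[k]? = none := List.getElem?_eq_none (by omega)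
      rw [if_neg (by simpa using hge), hnone, ih]
      rfl

-- a block of equal characters below an already-sorted tail stays sorted
theorem pv_rep_pairwise (x : Char) (n : Nat) (rest : List Char)
    (hr : rest.Pairwise (· ≤ ·)) (hx : ∀ y ∈ rest, x ≤ y) :
    (List.replicate n x ++ rest).Pairwise (· ≤ ·) := by
  apply List.pairwise_append.mpr
  refine ⟨List.pairwise_replicate.mpr (Or.inr le_rfl), hr, ?_⟩
  intro a ha b hb
  rw [List.eq_of_mem_replicate ha]
  exact hx b hb

-- the sorted column, named: blocks of A, C, G, T
def pvReps (a c g t : Nat) : List Char :=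
  List.replicate a 'A' ++ List.replicate c 'C' ++ List.replicate g 'G' ++ List.replicate t 'T'

theorem pv_sorted_col (col : List Char) (h : ∀ x ∈ col, x ∈ ['A','T','G','C']) :
    PySem.List.sorted col (fun c => c) false =
    pvReps (col.count 'A') (col.count 'C') (col.count 'G') (col.count 'T') := by
  apply PySem.List.sorted_id_eq_of_perm_of_pairwise
  · rw [List.perm_iff_count]
    intro x
    by_cases hx : x ∈ (['A','T','G','C'] : List Char)
    · fin_cases hx <;> simp [pvReps, List.count_append, List.count_replicate]
    · have h1 : col.count x = 0 := by
        rw [List.count_eq_zero]; intro hmem; exact hx (h x hmem)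
      have h2 : (pvReps (col.count 'A') (col.count 'C') (col.count 'G') (col.count 'T')).count x = 0 := by
        rw [List.count_eq_zero]
        intro hmem
        simp only [pvReps, List.append_assoc, List.mem_append, List.mem_replicate] at hmem
        rcases hmem with ⟨_, rfl⟩ | ⟨_, rfl⟩ | ⟨_, rfl⟩ | ⟨_, rfl⟩ <;> simp at hx
      rw [h1, h2]
  · simp only [pvReps, List.append_assoc]
    have pT : (List.replicate (col.count 'T') 'T' : List Char).Pairwise (· ≤ ·) :=
      List.pairwise_replicate.mpr (Or.inr le_rfl)
    have pGT := pv_rep_pairwise 'G' (col.count 'G') _ pT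
      (by intro y hy; rw [List.eq_of_mem_replicate hy]; decide)
    have pCGT := pv_rep_pairwise 'C' (col.count 'C') _ pGT
      (by intro y hy
          rcases List.mem_append.mp hy with h | h <;> rw [List.eq_of_mem_replicate h] <;> decide)
    exact pv_rep_pairwise 'A' (col.count 'A') _ pCGT
      (by intro y hy
          rcases List.mem_append.mp hy with h | h
          · rw [List.eq_of_mem_replicate h]; decide
          · rcases List.mem_append.mp h with h2 | h2 <;> rw [List.eq_of_mem_replicate h2] <;> decide)

-- pvRunsAux on one nonempty block followed by characters other than x
theorem pv_runsAux_block (fuel : Nat) (x : Char) (n : Nat) (rest : List Char)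
    (h : ∀ y ∈ rest, y ≠ x) :
    pvRunsAux (fuel+1) (List.replicate (n+1) x ++ rest) =
    (x, ((n+1 : Nat) : Int)) :: pvRunsAux fuel rest := by
  have htw : ∀ m : Nat, (List.replicate m x ++ rest).takeWhile (fun y => y == x) = List.replicate m x := by
    intro m
    induction m with
    | zero =>
      cases rest with
      | nil => rfl
      | cons y t => simp [h y (by simp)]
    | succ m ih => simp [List.replicate_succ, ih]
  have hrep : List.replicate (n+1) x ++ rest = x :: (List.replicate n x ++ rest) := by
    simp [List.replicate_succ]
  rw [hrep, pvRunsAux, htw n]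
  simp [List.length_replicate, List.drop_left']

-- pvRunsAux on a flattened block list with pairwise distinct characters and enough fuel
theorem pv_runsAux_blocks : ∀ (L : List (Char × Nat)) (fuel : Nat),
    L.Pairwise (fun p q => p.1 ≠ q.1) →
    ((L.map (fun p => List.replicate p.2 p.1)).flatten).length ≤ fuel →
    pvRunsAux fuel ((L.map (fun p => List.replicate p.2 p.1)).flatten) =
    (L.filter (fun p => decide (0 < p.2))).map (fun p => (p.1, (p.2 : Int))) := by
  intro L
  induction L with
  | nil => intro fuel _ _; cases fuel <;> rfl
  | cons p L ih =>
    intro fuel hp hfuel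
    obtain ⟨hhd, htl⟩ := List.pairwise_cons.mp hp
    obtain ⟨x, n⟩ := p
    cases n with
    | zero =>
      simp only [List.map_cons, List.flatten_cons, List.replicate_zero, List.nil_append] at hfuel ⊢
      simpa using ih fuel htl hfuel
    | succ n =>
      simp only [List.map_cons, List.flatten_cons, List.length_append, List.length_replicate] at hfuel ⊢
      obtain ⟨f, rfl⟩ : ∃ f, fuel = f + 1 := ⟨fuel - 1, by omega⟩
      rw [pv_runsAux_block f x n _ ?_, ih f htl (by omega)]
      · simp
      · intro y hy
        simp only [List.mem_flatten, List.mem_map] at hy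
        obtain ⟨l, ⟨q, hq, rfl⟩, hyl⟩ := hy
        have := (List.mem_replicate.mp hyl).2
        subst this
        exact (hhd q hq).symm

-- and therefore pvRuns itself (its fuel is the length, which always suffices)
theorem pv_runs_blocks (L : List (Char × Nat)) (hp : L.Pairwise (fun p q => p.1 ≠ q.1)) :
    pvRuns ((L.map (fun p => List.replicate p.2 p.1)).flatten) =
    (L.filter (fun p => decide (0 < p.2))).map (fun p => (p.1, (p.2 : Int))) :=
  pv_runsAux_blocks L _ hp le_rfl

-- the run counts land in the four slots; an absent base leaves its initial 0 = its count
theorem pv_counts_eq (a c g t : Nat) :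
    (((([('A',a),('C',c),('G',g),('T',t)] : List (Char × Nat)).filter
        (fun p => decide (0 < p.2))).map (fun p => (p.1, (p.2 : Int)))).foldl
      (fun counts r => counts.set (PySem.Chars.find "ACGT".toList [r.1]).toNat r.2) [(0 : Int), 0, 0, 0]) =
    [(a : Int), (c : Int), (g : Int), (t : Int)] := by
  have iA : (PySem.Chars.find ['A','C','G','T'] ['A']).toNat = 0 := by decide
  have iC : (PySem.Chars.find ['A','C','G','T'] ['C']).toNat = 1 := by decide
  have iG : (PySem.Chars.find ['A','C','G','T'] ['G']).toNat = 2 := by decide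
  have iT : (PySem.Chars.find ['A','C','G','T'] ['T']).toNat = 3 := by decide
  rcases Nat.eq_zero_or_pos a with rfl | ha <;> rcases Nat.eq_zero_or_pos c with rfl | hc <;>
    rcases Nat.eq_zero_or_pos g with rfl | hg <;> rcases Nat.eq_zero_or_pos t with rfl | ht <;>
    simp [List.filter_cons, iA, iC, iG, iT, *]

theorem pvAltVal_eq (sl : List String) (k : Nat)
    (hchars : ∀ x ∈ pvCol sl k, x ∈ (['A','T','G','C'] : List Char)) :
    pvAltVal sl (k : Int) =
    pvSymbolTable.getD (String.ofList (pvKey ((pvCol sl k).count 'A') ((pvCol sl k).count 'C')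
      ((pvCol sl k).count 'G') ((pvCol sl k).count 'T')
      ([((pvCol sl k).count 'T' : Int), ((pvCol sl k).count 'G' : Int), ((pvCol sl k).count 'C' : Int)].foldl
        max ((pvCol sl k).count 'A' : Int)))) "" := by
  set a := (pvCol sl k).count 'A' with hadef
  set c := (pvCol sl k).count 'C' with hcdef
  set g := (pvCol sl k).count 'G' with hgdef
  set t := (pvCol sl k).count 'T' with htdef
  set L : List (Char × Nat) := [('A',a),('C',c),('G',g),('T',t)] with hLdef
  -- the run-length encoding of the sorted column
  have hflat : ((L.map (fun p => List.replicate p.2 p.1)).flatten) = pvReps a c g t := by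
    simp [hLdef, pvReps]
  have hpair : L.Pairwise (fun p q => p.1 ≠ q.1) := by
    simp [hLdef, List.pairwise_cons]
  have hruns : pvRuns (pvReps a c g t) =
      (L.filter (fun p => decide (0 < p.2))).map (fun p => (p.1, (p.2 : Int))) := by
    rw [← hflat, pv_runs_blocks L hpair]
  show (let col := PySem.List.sorted
          ((sl.filter (fun s => decide ((k:Int) < PySem.List.len s.toList))).map
            (fun s => PySem.List.pyGetD s.toList (k:Int) 'A')) (fun c => c) false
        let counts := (pvRuns col).foldl (fun counts r =>
            counts.set (PySem.Chars.find "ACGT".toList [r.1]).toNat r.2) [(0 : Int), 0, 0, 0]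
        let best := (PySem.List.max? counts (fun v => v)).getD 0
        let winners := String.ofList (((("ACGT".toList).zip counts).filter (fun p => p.2 == best)).map (fun p => p.1))
        pvSymbolTable.getD winners "") = _
  rw [pv_col_eq sl k, pv_sorted_col _ hchars, ← hadef, ← hcdef, ← hgdef, ← htdef]
  simp only [hruns]
  have hcounts := pv_counts_eq a c g t
  rw [← hLdef] at hcounts
  rw [hcounts, PySem.List.max?_id_cons]
  have hmeq : ([(c : Int), (g : Int), (t : Int)].foldl max (a : Int)) =
      ([(t : Int), (g : Int), (c : Int)].foldl max (a : Int)) := by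
    show max (max (max (a:Int) c) g) t = max (max (max (a:Int) t) g) c
    omega
  simp only [Option.getD_some, hmeq]
  rfl

theorem pv_main : ∀ (seq_list : List String),
    Pre_consensus_with_degenerate_alphabet seq_list →
    consensus_with_degenerate_alphabet seq_list = consensus_with_degenerate_alphabet_alt seq_list := by
  intro sl hpre
  obtain ⟨hne, hall⟩ := hpre
  rw [List.all_eq_true] at hall
  have hchars : ∀ s ∈ sl, ∀ c ∈ s.toList, c ∈ (['A','T','G','C'] : List Char) := by
    intro s hs c hc
    have h1 := hall s hs
    simp only [Bool.and_eq_true, List.all_eq_true] at h1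
    simpa [List.contains_eq_mem] using h1.2 c hc
  have hcolmem : ∀ (k : Nat), ∀ x ∈ pvCol sl k, x ∈ (['A','T','G','C'] : List Char) := by
    intro k x hx
    obtain ⟨s, hs, hsome⟩ := List.mem_filterMap.mp hx
    exact hchars s hs x (List.mem_of_getElem? hsome)
  simp only [consensus_with_degenerate_alphabet, consensus_with_degenerate_alphabet_alt]
  rw [PySem.List.foldl_append_singleton_eq_map, PySem.List.foldl_append_singleton_eq_map]
  simp only [List.nil_append, PySem.List.len_eq, PySem.List.pyRange_zero_natCast, List.map_map]
  set n := (sl.headD "").toList.length with hn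
  apply List.ext_getElem?
  intro k
  rw [List.getElem?_map, List.getElem?_map]
  rw [pv_outer_getElem?]
  rw [List.getElem?_map]
  by_cases hk : k < n
  · rw [List.getElem?_range hk]
    simp only [Option.map_some, Function.comp_apply]
    congr 1
    rw [show PySem.Dict.ofList [('A',(0:Int)),('T',0),('G',0),('C',0)] = pvBase from rfl]
    rw [pv_colCnt_eq _ (hcolmem k), pvChoose_eq]
    rw [pvAltVal_eq sl k (hcolmem k)]
  · have hnone : (List.range n)[k]? = none := List.getElem?_eq_none (by simpa using hk)
    simp only [hnone, Option.map_none]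

-- ===== VERDICT (by name: the statement is the Claim_ definition above) =====
theorem consensus_with_degenerate_alphabet_spec : Claim_equal_consensus_with_degenerate_alphabet := by
  intro sl _ hpre
  unfold Spec_consensus_with_degenerate_alphabet
  exact pv_main sl hpre
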